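-- pv_equiv track=rewrite | github.com/aliazak6/Python-Reliable-Transport-with-UDP | receiver.py | calculateSeq
-- ===== SOURCE A (Python) =====
-- def calculateSeq(buffer,expected_seq_num) -> int :
--     try:
--         if(buffer[expected_seq_num]) : # if it is buffered find next necessary packet
--             expected_seq_num +=1
--             expected_seq_num = calculateSeq(buffer,expected_seq_num)
--             return expected_seq_num
--         return expected_seq_num
--
--     except IndexError:
--         return expected_seq_num-1
-- ===== SOURCE B (Python) =====
-- def calculateSeq(buffer, expected_seq_num) -> int:
--     try:
--         while buffer[expected_seq_num]:
--             expected_seq_num += 1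
--         return expected_seq_num
--     except IndexError:
--         return expected_seq_num - 1
-- ===== Notes on version B (the rewrite author's own statement) =====
-- stated objective: idiomatic
-- what changed: Replaces A's per-step tail recursion (one try/except frame per packet) with a single iterative while-loop over the advancing index inside one try/except.
import Mathlib
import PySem

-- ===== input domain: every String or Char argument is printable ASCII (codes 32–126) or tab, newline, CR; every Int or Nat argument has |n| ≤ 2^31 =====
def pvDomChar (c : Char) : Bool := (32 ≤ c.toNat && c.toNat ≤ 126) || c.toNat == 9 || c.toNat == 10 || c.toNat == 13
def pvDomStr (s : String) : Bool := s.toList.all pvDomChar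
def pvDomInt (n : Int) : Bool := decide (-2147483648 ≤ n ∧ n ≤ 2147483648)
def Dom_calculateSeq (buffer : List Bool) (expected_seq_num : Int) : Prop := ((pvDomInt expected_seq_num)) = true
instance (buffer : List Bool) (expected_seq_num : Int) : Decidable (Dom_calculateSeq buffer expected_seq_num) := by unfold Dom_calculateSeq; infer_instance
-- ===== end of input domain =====

-- B rewrites A's per-step tail recursion as a single while loop inside one try/except (objective: idiomatic).

-- ===== PORT A =====
-- A recurses while buffer[expected_seq_num] is truthy; each call has its own try/except,
-- so buffer[e] raising IndexError (pyGet? = none) returns e-1 from that call.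
def calculateSeq (buffer : List Bool) (expected_seq_num : Int) : Int :=
  match h : PySem.List.pyGet? buffer expected_seq_num with
  | none => expected_seq_num - 1
  | some b =>
      if b then calculateSeq buffer (expected_seq_num + 1)
      else expected_seq_num
termination_by ((buffer.length : Int) - expected_seq_num).toNat
decreasing_by
  have hne : PySem.List.pyGet? buffer expected_seq_num ≠ none := by simp [h]
  have hir : PySem.Raise.InRange buffer.length expected_seq_num := by
    by_contra hc; exact hne ((PySem.List.pyGet?_eq_none_iff buffer expected_seq_num).mpr hc)
  unfold PySem.Raise.InRange at hir
  omega

-- ===== PORT B =====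
-- B's `while buffer[expected_seq_num]: expected_seq_num += 1` loop: it ends either with a
-- normal fall-through at index e (.inl e) or with an IndexError raised while e was current (.inr e).
def calcWhile (buffer : List Bool) (e : Int) : Int ⊕ Int :=
  match h : PySem.List.pyGet? buffer e with
  | none => Sum.inr e
  | some b => if b then calcWhile buffer (e + 1) else Sum.inl e
termination_by ((buffer.length : Int) - e).toNat
decreasing_by
  have hne : PySem.List.pyGet? buffer e ≠ none := by simp [h]
  have hir : PySem.Raise.InRange buffer.length e := by
    by_contra hc; exact hne ((PySem.List.pyGet?_eq_none_iff buffer e).mpr hc)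
  unfold PySem.Raise.InRange at hir
  omega

-- B: run the loop; `return expected_seq_num` on fall-through, the except branch returns e-1.
def calculateSeq_alt (buffer : List Bool) (expected_seq_num : Int) : Int :=
  match calcWhile buffer expected_seq_num with
  | Sum.inl r => r
  | Sum.inr ex => ex - 1

-- ===== PRECONDITION & SPEC =====
def Spec_calculateSeq (buffer : List Bool) (expected_seq_num : Int) (out : Int) : Prop := out = calculateSeq_alt buffer expected_seq_num
instance (buffer : List Bool) (expected_seq_num : Int) (out : Int) : Decidable (Spec_calculateSeq buffer expected_seq_num out) := by unfold Spec_calculateSeq; infer_instance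

-- ===== CLAIM (what is proved, stated in full; the proofs are below) =====
def Claim_equal_calculateSeq : Prop := ∀ (buffer : List Bool) (expected_seq_num : Int), Dom_calculateSeq buffer expected_seq_num → Spec_calculateSeq buffer expected_seq_num (calculateSeq buffer expected_seq_num)

-- ===== LEMMAS AND PROOFS =====

-- unfolding equation for A's port (drops the unused match hypothesis)
lemma calculateSeq_eq (buffer : List Bool) (e : Int) :
    calculateSeq buffer e
      = match PySem.List.pyGet? buffer e with
        | none => e - 1
        | some b => if b then calculateSeq buffer (e + 1) else e := by
  rw [calculateSeq]
  cases hx : PySem.List.pyGet? buffer e <;> simp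

-- unfolding equation for B's loop
lemma calcWhile_eq (buffer : List Bool) (e : Int) :
    calcWhile buffer e
      = match PySem.List.pyGet? buffer e with
        | none => Sum.inr e
        | some b => if b then calcWhile buffer (e + 1) else Sum.inl e := by
  rw [calcWhile]
  cases hx : PySem.List.pyGet? buffer e <;> simp

-- the recursion and the loop produce the same value, by induction along the same measure
lemma calc_agree (buffer : List Bool) :
    ∀ (d : Nat) (e : Int), ((buffer.length : Int) - e).toNat ≤ d →
      calculateSeq buffer e
        = match calcWhile buffer e with
          | Sum.inl r => r
          | Sum.inr ex => ex - 1 := by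
  intro d
  induction d with
  | zero =>
      intro e hd
      rw [calculateSeq_eq, calcWhile_eq]
      cases hx : PySem.List.pyGet? buffer e with
      | none => simp
      | some b =>
          have hne : PySem.List.pyGet? buffer e ≠ none := by simp [hx]
          have hir : PySem.Raise.InRange buffer.length e := by
            by_contra hc; exact hne ((PySem.List.pyGet?_eq_none_iff buffer e).mpr hc)
          unfold PySem.Raise.InRange at hir
          omega
  | succ m ih =>
      intro e hd
      rw [calculateSeq_eq, calcWhile_eq]
      cases hx : PySem.List.pyGet? buffer e with
      | none => simp
      | some b =>
          by_cases hb : b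
          · simp only [hb, if_pos]
            have hne : PySem.List.pyGet? buffer e ≠ none := by simp [hx]
            have hir : PySem.Raise.InRange buffer.length e := by
              by_contra hc; exact hne ((PySem.List.pyGet?_eq_none_iff buffer e).mpr hc)
            unfold PySem.Raise.InRange at hir
            exact ih (e + 1) (by omega)
          · simp [hb]

-- ===== VERDICT (by name: the statement is the Claim_ definition above) =====
theorem calculateSeq_spec : Claim_equal_calculateSeq := by
  intro buffer e _
  unfold Spec_calculateSeq calculateSeq_alt
  exact calc_agree buffer ((buffer.length : Int) - e).toNat e le_rfl
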